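-- pv_equiv track=rewrite | github.com/ermiyam/gen | autonomous_ai.py | _determine_learning_style
-- ===== SOURCE A (Python) =====
-- def _determine_learning_style(strategy: str) -> str:
--     """Determine the learning style based on the strategy"""
--     if any(word in strategy.lower() for word in ['visual', 'mind map', 'watch']):
--         return 'visual'
--     elif any(word in strategy.lower() for word in ['listen', 'podcast', 'discussion']):
--         return 'auditory'
--     elif any(word in strategy.lower() for word in ['practice', 'apply', 'solve']):
--         return 'kinesthetic'
--     elif any(word in strategy.lower() for word in ['read', 'write', 'teach']):
--         return 'reading/writing'
--     return 'mixed'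
-- ===== SOURCE B (Python) =====
-- def _determine_learning_style(strategy: str) -> str:
--     """Single left-to-right scan: at each position test all keyword groups at once
--     (naive multi-pattern matching), accumulate which styles occurred, then resolve
--     by priority."""
--     s = strategy.lower()
--     v = a = k = r = False
--     for i in range(len(s)):
--         v = v or s.startswith(('visual', 'mind map', 'watch'), i)
--         a = a or s.startswith(('listen', 'podcast', 'discussion'), i)
--         k = k or s.startswith(('practice', 'apply', 'solve'), i)
--         r = r or s.startswith(('read', 'write', 'teach'), i)
--     if v:
--         return 'visual'
--     if a:
--         return 'auditory'
--     if k: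
--         return 'kinesthetic'
--     if r:
--         return 'reading/writing'
--     return 'mixed'
-- ===== Notes on version B (the rewrite author's own statement) =====
-- stated objective: alternative
-- what changed: Replaces four per-group substring searches (each rescanning a fresh lowercase copy) with one left-to-right scan of the lowered string that tests all keyword groups at every position (naive multi-pattern matching), accumulating four found-flags resolved by priority at the end.
import Mathlib
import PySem

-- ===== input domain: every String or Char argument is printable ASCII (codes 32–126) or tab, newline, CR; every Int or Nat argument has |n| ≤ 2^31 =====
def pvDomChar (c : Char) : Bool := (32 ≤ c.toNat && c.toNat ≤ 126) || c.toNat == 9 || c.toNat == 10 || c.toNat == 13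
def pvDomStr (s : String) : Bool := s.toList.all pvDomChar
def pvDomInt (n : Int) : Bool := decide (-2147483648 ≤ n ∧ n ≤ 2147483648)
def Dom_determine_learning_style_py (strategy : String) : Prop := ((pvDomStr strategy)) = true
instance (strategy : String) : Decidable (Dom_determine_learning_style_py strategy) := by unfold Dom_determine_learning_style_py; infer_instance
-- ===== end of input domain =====

-- B replaces A's four per-group substring searches with one positional scan of the lowered string matching all keyword groups at once (alternative algorithm, same results).


-- ===== PORT A =====
-- literal port of A: each branch recomputes strategy.lower() and tests any(word in …)
def determine_learning_style_py (strategy : String) : String :=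
  if ["visual", "mind map", "watch"].any (fun w => PySem.Str.isIn w (PySem.Str.lower strategy)) then "visual"
  else if ["listen", "podcast", "discussion"].any (fun w => PySem.Str.isIn w (PySem.Str.lower strategy)) then "auditory"
  else if ["practice", "apply", "solve"].any (fun w => PySem.Str.isIn w (PySem.Str.lower strategy)) then "kinesthetic"
  else if ["read", "write", "teach"].any (fun w => PySem.Str.isIn w (PySem.Str.lower strategy)) then "reading/writing"
  else "mixed"

-- ===== PORT B =====
-- s.startswith((w1,…), i): does any word of the group start at position i of t
def pvStartsAt (t : List Char) (i : Nat) (ws : List (List Char)) : Bool :=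
  ws.any (fun w => w.isPrefixOf (t.drop i))

-- the scan loop: fold over the positions of t, four found-flags as the accumulator
def pvScan (t : List Char) : Bool × Bool × Bool × Bool :=
  (List.range t.length).foldl
    (fun (st : Bool × Bool × Bool × Bool) i =>
      (st.1 || pvStartsAt t i ["visual".toList, "mind map".toList, "watch".toList],
       st.2.1 || pvStartsAt t i ["listen".toList, "podcast".toList, "discussion".toList],
       st.2.2.1 || pvStartsAt t i ["practice".toList, "apply".toList, "solve".toList],
       st.2.2.2 || pvStartsAt t i ["read".toList, "write".toList, "teach".toList]))
    (false, false, false, false)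

-- one scan over the lowered string, then resolve the flags by priority
def determine_learning_style_py_alt (strategy : String) : String :=
  let st := pvScan (PySem.Chars.lower strategy.toList)
  if st.1 then "visual"
  else if st.2.1 then "auditory"
  else if st.2.2.1 then "kinesthetic"
  else if st.2.2.2 then "reading/writing"
  else "mixed"

-- ===== PRECONDITION & SPEC =====
def Spec_determine_learning_style_py (strategy : String) (out : String) : Prop := out = determine_learning_style_py_alt strategy
instance (strategy : String) (out : String) : Decidable (Spec_determine_learning_style_py strategy out) := by unfold Spec_determine_learning_style_py; infer_instance

-- ===== CLAIM (what is proved, stated in full; the proofs are below) =====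
def Claim_equal_determine_learning_style_py : Prop := ∀ (strategy : String), Dom_determine_learning_style_py strategy → Spec_determine_learning_style_py strategy (determine_learning_style_py strategy)

-- ===== LEMMAS AND PROOFS =====

-- the 4-flag or-accumulating fold is componentwise 'initial || any'
theorem pv_fold4 (g1 g2 g3 g4 : Nat → Bool) (l : List Nat) (b1 b2 b3 b4 : Bool) :
    l.foldl (fun (st : Bool × Bool × Bool × Bool) i =>
        (st.1 || g1 i, st.2.1 || g2 i, st.2.2.1 || g3 i, st.2.2.2 || g4 i)) (b1, b2, b3, b4)
      = (b1 || l.any g1, b2 || l.any g2, b3 || l.any g3, b4 || l.any g4) := by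
  induction l generalizing b1 b2 b3 b4 with
  | nil => simp
  | cons x xs ih => simp [List.foldl_cons, ih, Bool.or_assoc]

-- distribute any over a pointwise or
theorem pv_any_or (l : List Nat) (f g : Nat → Bool) :
    l.any (fun i => f i || g i) = (l.any f || l.any g) := by
  induction l with
  | nil => simp
  | cons x xs ih => simp [List.any_cons, ih]; ac_rfl

-- a nonempty word starts at some position below the length iff it is a substring
theorem pv_occ (t w : List Char) (hw : w ≠ []) :
    (List.range t.length).any (fun i => w.isPrefixOf (t.drop i)) = PySem.Chars.isIn w t := by
  rcases h : PySem.Chars.isIn w t with _ | _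
  · rw [PySem.Chars.isIn_eq_false_iff] at h
    simp only [List.any_eq_false, List.mem_range]
    simp only [List.isPrefixOf_iff_prefix]
    intro i _ hp
    exact h (hp.isInfix.trans (t.drop_suffix i).isInfix)
  · rw [← PySem.Chars.exists_prefix_drop_iff_isIn] at h
    obtain ⟨j, hj⟩ := h
    have hjlt : j < t.length := by
      by_contra hge
      rw [List.drop_eq_nil_of_le (le_of_not_gt hge)] at hj
      exact hw (List.prefix_nil.mp hj)
    simp only [List.any_eq_true, List.mem_range]
    exact ⟨j, hjlt, List.isPrefixOf_iff_prefix.mpr hj⟩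

-- a three-word group matches at some position iff one of its words is a substring
theorem pv_group (t w1 w2 w3 : List Char) (h1 : w1 ≠ []) (h2 : w2 ≠ []) (h3 : w3 ≠ []) :
    (List.range t.length).any (fun i => pvStartsAt t i [w1, w2, w3])
      = (PySem.Chars.isIn w1 t || PySem.Chars.isIn w2 t || PySem.Chars.isIn w3 t) := by
  simp only [pvStartsAt, List.any_cons, List.any_nil, Bool.or_false]
  rw [pv_any_or, pv_any_or, pv_occ t w1 h1, pv_occ t w2 h2, pv_occ t w3 h3, Bool.or_assoc]

-- the scan computes, per group, whether some keyword of the group is a substring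
theorem pvScan_eq (t : List Char) :
    pvScan t =
      (PySem.Chars.isIn "visual".toList t || PySem.Chars.isIn "mind map".toList t || PySem.Chars.isIn "watch".toList t,
       PySem.Chars.isIn "listen".toList t || PySem.Chars.isIn "podcast".toList t || PySem.Chars.isIn "discussion".toList t,
       PySem.Chars.isIn "practice".toList t || PySem.Chars.isIn "apply".toList t || PySem.Chars.isIn "solve".toList t,
       PySem.Chars.isIn "read".toList t || PySem.Chars.isIn "write".toList t || PySem.Chars.isIn "teach".toList t) := by
  unfold pvScan
  rw [pv_fold4]
  simp only [Bool.false_or]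
  rw [pv_group t _ _ _ (by decide) (by decide) (by decide),
      pv_group t _ _ _ (by decide) (by decide) (by decide),
      pv_group t _ _ _ (by decide) (by decide) (by decide),
      pv_group t _ _ _ (by decide) (by decide) (by decide)]

-- ===== VERDICT (by name: the statement is the Claim_ definition above) =====
theorem determine_learning_style_py_spec : Claim_equal_determine_learning_style_py := by
  intro s _
  unfold Spec_determine_learning_style_py determine_learning_style_py determine_learning_style_py_alt
  simp only [pvScan_eq, List.any_cons, List.any_nil, Bool.or_false,
    PySem.Str.isIn_eq, PySem.Str.toList_lower, Bool.or_assoc]
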